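-- pv_equiv track=rewrite | github.com/JakubBraz/adventofcode | 2025/day12.py | distances_to_begin
-- ===== SOURCE A (Python) =====
-- def distances_to_begin(shape):
--     result = []
--     start_points = []
--     i, j = 0, 0
--     while i < len(shape) and j < len(shape[0]):
--         start_points.append((i, j))
--         if j + 1 < len(shape[0]):
--             j += 1
--         else:
--             i += 1
--     for i, j in start_points:
--         count = 0
--         x, y = i, j
--         while x < len(shape) and y >= 0:
--             if shape[x][y] == "#":
--                 count += 1
--             x += 1
--             y -= 1
--         result.append(count)
--     return result
-- ===== SOURCE B (Python) =====
-- def distances_to_begin(shape):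
--     if not shape or not shape[0]:
--         return []
--     rows, cols = len(shape), len(shape[0])
--     result = [0] * (rows + cols - 1)
--     for i in range(rows):
--         for j in range(cols):
--             if shape[i][j] == "#":
--                 result[i + j] += 1
--     return result
-- ===== Notes on version B (the rewrite author's own statement) =====
-- stated objective: simpler
-- what changed: Instead of enumerating diagonal start points and walking each anti-diagonal cell by cell, B makes one row-major pass and buckets every '#' cell into result[i+j].
import Mathlib
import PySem

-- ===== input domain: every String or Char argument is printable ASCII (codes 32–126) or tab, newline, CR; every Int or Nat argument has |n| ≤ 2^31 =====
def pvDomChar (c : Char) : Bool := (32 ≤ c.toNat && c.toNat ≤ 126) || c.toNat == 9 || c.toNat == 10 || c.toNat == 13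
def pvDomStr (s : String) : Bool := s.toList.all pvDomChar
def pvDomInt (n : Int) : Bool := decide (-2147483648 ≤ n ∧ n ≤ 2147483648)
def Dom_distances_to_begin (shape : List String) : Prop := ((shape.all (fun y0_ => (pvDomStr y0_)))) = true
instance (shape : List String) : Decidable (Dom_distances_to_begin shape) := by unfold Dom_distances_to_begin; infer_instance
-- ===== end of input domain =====

-- B replaces A's start-point enumeration + per-diagonal walks by one row-major pass
-- that buckets each '#' cell into result[i+j] (objective: simpler).

-- ===== PORT A =====
-- shape[x][y] == "#": exact on in-range indices; an out-of-range index is an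
-- IndexError in Python (excluded by Pre_), here it yields false.
def dtbHit (shape : List String) (x y : Int) : Bool :=
  ((PySem.List.pyGet? shape x).bind (fun r => PySem.Str.pyGet? r y)) == some '#'

-- the first while loop collecting start_points
def dtbStarts (R C i j : Nat) : List (Nat × Nat) :=
  if _h : i < R ∧ j < C then
    (i, j) :: (if j + 1 < C then dtbStarts R C i (j + 1) else dtbStarts R C (i + 1) j)
  else []
termination_by (R - i) + (C - j)
decreasing_by all_goals omega

-- the inner while loop walking one anti-diagonal with accumulator count
def dtbWalk (shape : List String) (R : Nat) (x : Nat) (y : Int) (count : Int) : Int :=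
  if _h : x < R ∧ 0 ≤ y then
    dtbWalk shape R (x + 1) (y - 1) (if dtbHit shape x y then count + 1 else count)
  else count
termination_by R - x
decreasing_by omega

def distances_to_begin (shape : List String) : List Int :=
  (dtbStarts shape.length (shape.headD "").toList.length 0 0).map
    (fun p => dtbWalk shape shape.length p.1 (p.2 : Int) 0)

-- ===== PORT B =====
def distances_to_begin_alt (shape : List String) : List Int :=
  if shape.isEmpty || (shape.headD "").toList.isEmpty then []
  else
    (List.range shape.length).foldl
      (fun (res : List Int) (i : Nat) =>
        (List.range (shape.headD "").toList.length).foldl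
          (fun (res : List Int) (j : Nat) =>
            if dtbHit shape (i : Int) (j : Int) then res.modify (i + j) (· + 1) else res)
          res)
      (List.replicate (shape.length + (shape.headD "").toList.length - 1) 0)

-- ===== PRECONDITION & SPEC =====
-- Pre_ excludes exactly the jagged grids on which Python A raises IndexError
-- (some row shorter than the first row); there A's port returns while A raises.
def Pre_distances_to_begin (shape : List String) : Prop :=
  ∀ r ∈ shape, (shape.headD "").toList.length ≤ r.toList.length
instance (shape : List String) : Decidable (Pre_distances_to_begin shape) := by
  unfold Pre_distances_to_begin; infer_instance
def pvWitness_distances_to_begin : List String := ["#._", ".#.", "__#"]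

def Spec_distances_to_begin (shape : List String) (out : List Int) : Prop := out = distances_to_begin_alt shape
instance (shape : List String) (out : List Int) : Decidable (Spec_distances_to_begin shape out) := by unfold Spec_distances_to_begin; infer_instance

-- ===== CLAIM (what is proved, stated in full; the proofs are below) =====
def Claim_equal_distances_to_begin : Prop := ∀ (shape : List String), Dom_distances_to_begin shape → Pre_distances_to_begin shape → Spec_distances_to_begin shape (distances_to_begin shape)

-- ===== LEMMAS AND PROOFS =====

-- indicator: row x contributes a '#' to anti-diagonal s of a grid with C columns
def dInd (shape : List String) (C s x : Nat) : Bool :=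
  decide (x ≤ s) && decide (s - x < C) && dtbHit shape (x : Int) ((s - x : Nat) : Int)

-- the start point of diagonal s
def dStartSpec (C s : Nat) : Nat × Nat := if s < C then (0, s) else (s - C + 1, C - 1)

lemma dtbWalk_eq (shape : List String) (R C s : Nat) :
    ∀ n x c, R - x = n → s < x + C →
      dtbWalk shape R x ((s : Int) - x) c
        = c + ((List.range' x (R - x)).countP (dInd shape C s) : Int) := by
  intro n
  induction n with
  | zero =>
    intro x c hn _
    have hx : ¬ (x < R ∧ 0 ≤ (s : Int) - (x : Nat)) := by
      intro h; omega
    rw [dtbWalk, dif_neg hx, hn]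
    simp
  | succ n ih =>
    intro x c hn hC
    have hxR : x < R := by omega
    by_cases hxs : x ≤ s
    · have hpos : (0 : Int) ≤ (s : Int) - (x : Nat) := by omega
      rw [dtbWalk, dif_pos ⟨hxR, hpos⟩]
      have harg : (s : Int) - (x : Nat) - 1 = (s : Int) - ((x + 1 : Nat) : Int) := by
        push_cast; ring
      rw [harg, ih (x + 1) _ (by omega) (by omega)]
      have hrange : List.range' x (R - x) = x :: List.range' (x + 1) (R - (x + 1)) := by
        have h1 : R - x = (R - (x + 1)) + 1 := by omega
        rw [h1, List.range'_succ]
      rw [hrange, List.countP_cons]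
      have hcast : ((s - x : Nat) : Int) = (s : Int) - (x : Nat) := by omega
      have hind : dInd shape C s x = dtbHit shape (x : Nat) ((s : Int) - (x : Nat)) := by
        simp only [dInd, hcast]
        have h1 : decide (x ≤ s) = true := by simp [hxs]
        have h2 : decide (s - x < C) = true := by simp; omega
        rw [h1, h2]; simp
      rw [hind]
      by_cases hhit : dtbHit shape (x : Nat) ((s : Int) - (x : Nat)) = true
      · simp only [hhit, if_pos]; push_cast; ring
      · simp only [Bool.not_eq_true] at hhit
        simp only [hhit]; push_cast; ring
    · have hneg : ¬ (x < R ∧ 0 ≤ (s : Int) - (x : Nat)) := by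
        intro h; omega
      rw [dtbWalk, dif_neg hneg]
      have hzero : (List.range' x (R - x)).countP (dInd shape C s) = 0 := by
        rw [List.countP_eq_zero]
        intro t ht
        rw [List.mem_range'_1] at ht
        simp only [dInd, Bool.and_eq_true, decide_eq_true_eq]
        rintro ⟨⟨h1, _⟩, _⟩
        omega
      rw [hzero]
      simp

lemma dtbStarts_col (R C : Nat) (hC : 0 < C) :
    ∀ n i, R - i = n →
      dtbStarts R C i (C - 1) = (List.range' i (R - i)).map (fun t => (t, C - 1)) := by
  intro n
  induction n with
  | zero =>
    intro i hn
    have hx : ¬ (i < R ∧ C - 1 < C) := by intro h; omega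
    rw [dtbStarts, dif_neg hx, hn]
    simp
  | succ n ih =>
    intro i hn
    have hiR : i < R := by omega
    rw [dtbStarts, dif_pos ⟨hiR, by omega⟩, if_neg (by omega), ih (i + 1) (by omega)]
    have h1 : R - i = (R - (i + 1)) + 1 := by omega
    rw [h1, List.range'_succ]
    simp

lemma dtbStarts_row (R C : Nat) (hR : 0 < R) :
    ∀ n j, C - 1 - j = n → j < C →
      dtbStarts R C 0 j
        = (List.range' j (C - 1 - j)).map (fun t => ((0 : Nat), t)) ++ dtbStarts R C 0 (C - 1) := by
  intro n
  induction n with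
  | zero =>
    intro j hn hj
    have hje : j = C - 1 := by omega
    subst hje
    simp
  | succ n ih =>
    intro j hn hj
    rw [dtbStarts, dif_pos ⟨hR, hj⟩, if_pos (by omega), ih (j + 1) (by omega) (by omega)]
    have h1 : C - 1 - j = (C - 1 - (j + 1)) + 1 := by omega
    rw [h1, List.range'_succ]
    simp

lemma dtbStarts_eq (R C : Nat) (hR : 0 < R) (hC : 0 < C) :
    dtbStarts R C 0 0 = (List.range (R + C - 1)).map (dStartSpec C) := by
  rw [dtbStarts_row R C hR (C - 1 - 0) 0 rfl hC, dtbStarts_col R C hC R 0 rfl]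
  have hsplit : List.range (R + C - 1) = List.range' 0 (C - 1) ++ List.range' (C - 1) R := by
    rw [List.range_eq_range']
    have h1 : R + C - 1 = (C - 1) + R := by omega
    rw [h1]
    have := List.range'_append (s := 0) (m := C - 1) (n := R) (step := 1)
    simpa using this.symm
  rw [hsplit, List.map_append]
  congr 1
  · apply List.map_congr_left
    intro t ht
    rw [List.mem_range'_1] at ht
    simp [dStartSpec]
    omega
  · rw [List.range'_eq_map_range, List.range'_eq_map_range]
    rw [List.map_map, List.map_map]
    apply List.map_congr_left
    intro k _
    simp only [Function.comp_apply, dStartSpec]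
    by_cases hk : k = 0
    · subst hk
      simp
      omega
    · rw [if_neg (by omega)]
      simp
      omega

lemma walk_spec (shape : List String) (R C s : Nat) (hC : 0 < C)
    (hs : s < R + C - 1) :
    dtbWalk shape R (dStartSpec C s).1 ((dStartSpec C s).2 : Int) 0
      = ((List.range R).countP (dInd shape C s) : Int) := by
  by_cases hsC : s < C
  · have h1 : dStartSpec C s = (0, s) := by simp [dStartSpec, hsC]
    rw [h1]
    have h2 : ((s : Nat) : Int) = (s : Int) - ((0 : Nat) : Int) := by omega
    rw [h2, dtbWalk_eq shape R C s (R - 0) 0 0 rfl (by omega)]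
    rw [List.range_eq_range']
    simp
  · have h1 : dStartSpec C s = (s - C + 1, C - 1) := by simp [dStartSpec, hsC]
    rw [h1]
    have hiR : s - C + 1 ≤ R := by omega
    have h2 : ((C - 1 : Nat) : Int) = (s : Int) - ((s - C + 1 : Nat) : Int) := by omega
    rw [h2, dtbWalk_eq shape R C s (R - (s - C + 1)) (s - C + 1) 0 rfl (by omega)]
    have hsplit : List.range R = List.range' 0 (s - C + 1) ++ List.range' (s - C + 1) (R - (s - C + 1)) := by
      rw [List.range_eq_range']
      have h3 : R = (s - C + 1) + (R - (s - C + 1)) := by omega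
      conv_lhs => rw [h3]
      have := List.range'_append (s := 0) (m := s - C + 1) (n := R - (s - C + 1)) (step := 1)
      simpa using this.symm
    rw [hsplit, List.countP_append]
    have hzero : (List.range' 0 (s - C + 1)).countP (dInd shape C s) = 0 := by
      rw [List.countP_eq_zero]
      intro t ht
      rw [List.mem_range'_1] at ht
      simp only [dInd, Bool.and_eq_true, decide_eq_true_eq]
      rintro ⟨⟨h1, h2⟩, _⟩
      omega
    rw [hzero]
    simp

lemma inner_fold (shape : List String) (i : Nat) :
    ∀ (js : List Nat) (res : List Int) (s : Nat),
      (js.foldl (fun (r : List Int) (j : Nat) => if dtbHit shape (i : Int) (j : Int) then r.modify (i + j) (· + 1) else r) res)[s]?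
        = res[s]?.map (fun v =>
            v + (js.countP (fun j => decide (i + j = s) && dtbHit shape (i : Int) (j : Int)) : Int)) := by
  intro js
  induction js with
  | nil =>
    intro res s
    simp only [List.foldl_nil, List.countP_nil, Nat.cast_zero]
    cases res[s]? <;> simp
  | cons j js ih =>
    intro res s
    simp only [List.foldl_cons, List.countP_cons]
    rw [ih]
    by_cases hhit : dtbHit shape (i : Int) (j : Int) = true
    · rw [if_pos hhit, List.getElem?_modify]
      cases hres : res[s]? with
      | none => simp
      | some v =>
        by_cases hij : i + j = s
        · simp [hij, hhit]
          ring
        · simp [hij]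
    · rw [if_neg hhit]
      simp only [Bool.not_eq_true] at hhit
      simp [hhit]

lemma outer_fold (shape : List String) (C : Nat) :
    ∀ (is_ : List Nat) (res : List Int) (s : Nat),
      (is_.foldl (fun (r : List Int) (i : Nat) =>
          (List.range C).foldl
            (fun (r : List Int) (j : Nat) => if dtbHit shape (i : Int) (j : Int) then r.modify (i + j) (· + 1) else r) r)
        res)[s]?
        = res[s]?.map (fun v =>
            v + ((is_.map (fun i =>
                (List.range C).countP
                  (fun j => decide (i + j = s) && dtbHit shape (i : Int) (j : Int)))).sum : Int)) := by
  intro is_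
  induction is_ with
  | nil =>
    intro res s
    simp only [List.foldl_nil, List.map_nil, List.sum_nil, Nat.cast_zero]
    cases res[s]? <;> simp
  | cons i is_ ih =>
    intro res s
    simp only [List.foldl_cons, List.map_cons, List.sum_cons]
    rw [ih, inner_fold]
    cases hres : res[s]? with
    | none => simp
    | some v =>
      simp only [Option.map_some]
      congr 1
      push_cast
      ring

lemma cnt_range_eq (shape : List String) (s i : Nat) :
    ∀ C, (List.range C).countP (fun j => decide (i + j = s) && dtbHit shape (i : Int) (j : Int))
      = if dInd shape C s i then 1 else 0 := by
  intro C
  induction C with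
  | zero =>
    have h0 : dInd shape 0 s i = false := by
      simp only [dInd]
      have : decide (s - i < 0) = false := by simp
      rw [this]
      simp
    simp [h0]
  | succ C ih =>
    rw [List.range_succ, List.countP_append, ih]
    simp only [List.countP_cons, List.countP_nil, Nat.zero_add]
    by_cases hC : i + C = s
    · have hic : ((C : Nat) : Int) = ((s - i : Nat) : Int) := by omega
      have h1 : dInd shape (C + 1) s i = dtbHit shape (i : Int) ((C : Nat) : Int) := by
        simp only [dInd, hic]
        have ha : decide (i ≤ s) = true := by simp; omega
        have hb : decide (s - i < C + 1) = true := by simp; omega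
        rw [ha, hb]
        simp
      have h2 : dInd shape C s i = false := by
        simp only [dInd]
        have hb : decide (s - i < C) = false := by simp; omega
        rw [hb]
        simp
      rw [h1, h2, if_neg (by simp)]
      simp [hC]
    · have h1 : dInd shape (C + 1) s i = dInd shape C s i := by
        by_cases his : i ≤ s
        · have hiff : (s - i < C + 1) = (s - i < C) := by
            apply propext
            constructor <;> intro <;> omega
          simp only [dInd, hiff]
        · have hno : decide (i ≤ s) = false := by simp; omega
          simp only [dInd, hno]
          simp
      rw [h1]
      simp [hC]

lemma sum_ite_countP (p : Nat → Bool) :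
    ∀ l : List Nat, (l.map (fun x => if p x then (1 : Nat) else 0)).sum = l.countP p := by
  intro l
  induction l with
  | nil => simp
  | cons x l ih =>
    simp only [List.map_cons, List.sum_cons, List.countP_cons, ih]
    omega

lemma main_eq (shape : List String) : distances_to_begin shape = distances_to_begin_alt shape := by
  cases shape with
  | nil =>
    rw [distances_to_begin, distances_to_begin_alt, dtbStarts]
    simp
  | cons r0 rest =>
    by_cases hc : r0.toList = []
    · rw [distances_to_begin, distances_to_begin_alt]
      simp only [List.headD_cons]
      rw [hc, dtbStarts]
      simp
    · have hR : 0 < (r0 :: rest).length := by simp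
      have hC : 0 < r0.toList.length := List.length_pos_iff.mpr hc
      rw [distances_to_begin, distances_to_begin_alt]
      simp only [List.headD_cons]
      have hguard : ((r0 :: rest).isEmpty || r0.toList.isEmpty) = false := by
        simp [hc]
      rw [hguard]
      simp only [Bool.false_eq_true, if_false]
      rw [dtbStarts_eq (r0 :: rest).length r0.toList.length hR hC, List.map_map]
      apply List.ext_getElem?
      intro s
      rw [List.getElem?_map]
      rw [outer_fold]
      rw [List.getElem?_replicate]
      by_cases hsb : s < (r0 :: rest).length + r0.toList.length - 1
      · rw [List.getElem?_range hsb, if_pos hsb]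
        simp only [Option.map_some, Function.comp_apply]
        rw [walk_spec (r0 :: rest) (r0 :: rest).length r0.toList.length s hC hsb]
        congr 1
        have hmap : (List.range (r0 :: rest).length).map
            (fun i => (List.range r0.toList.length).countP
              (fun j => decide (i + j = s) && dtbHit (r0 :: rest) (i : Int) (j : Int)))
            = (List.range (r0 :: rest).length).map
              (fun i => if dInd (r0 :: rest) r0.toList.length s i then 1 else 0) := by
          apply List.map_congr_left
          intro i _
          exact cnt_range_eq (r0 :: rest) s i r0.toList.length
        rw [hmap, sum_ite_countP (dInd (r0 :: rest) r0.toList.length s) (List.range (r0 :: rest).length)]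
        omega
      · rw [if_neg hsb]
        have : (List.range ((r0 :: rest).length + r0.toList.length - 1))[s]? = none := by
          rw [List.getElem?_eq_none_iff]
          simpa using hsb
        rw [this]
        simp

-- ===== VERDICT (by name: the statement is the Claim_ definition above) =====
theorem distances_to_begin_spec : Claim_equal_distances_to_begin := by
  intro shape _ _
  unfold Spec_distances_to_begin
  exact main_eq shape
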